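-- pv_equiv track=rewrite | github.com/maria-pugacheva/LeetCode | src/python/_01_easy/_2395_find-subarrays-with-equal-sum.py | solution
-- ===== SOURCE A (Python) =====
-- from typing import List
--
-- def solution(nums: List[int]) -> bool:
--     """Return True if there exist two sub-arrays of length 2 with equal
--     sum, and False otherwise.
--
--     Examples:
--         >>> solution([2, 2])
--         False
--         >>> solution([4, 2, 4])
--         True
--         >>> solution([1, 2, 3, 4, 5])
--         False
--         >>> solution([0, 0, 0])
--         True
--     """
--     sums = set()
--     for i in range(len(nums) - 1):
--         s = nums[i] + nums[i+1]
--         if s in sums: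
--             return True
--         sums.add(s)
--     return False
-- ===== SOURCE B (Python) =====
-- from typing import List
--
-- def solution(nums: List[int]) -> bool:
--     sums = sorted(x + y for x, y in zip(nums, nums[1:]))
--     for a, b in zip(sums, sums[1:]):
--         if a == b:
--             return True
--     return False
-- ===== Notes on version B (the rewrite author's own statement) =====
-- stated objective: alternative
-- what changed: Replaces the hash-set membership loop by a sort-based duplicate detection: build the adjacent pair sums, sort them, and scan the sorted list once for two equal neighbours (no set or membership test anywhere).
import Mathlib
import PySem

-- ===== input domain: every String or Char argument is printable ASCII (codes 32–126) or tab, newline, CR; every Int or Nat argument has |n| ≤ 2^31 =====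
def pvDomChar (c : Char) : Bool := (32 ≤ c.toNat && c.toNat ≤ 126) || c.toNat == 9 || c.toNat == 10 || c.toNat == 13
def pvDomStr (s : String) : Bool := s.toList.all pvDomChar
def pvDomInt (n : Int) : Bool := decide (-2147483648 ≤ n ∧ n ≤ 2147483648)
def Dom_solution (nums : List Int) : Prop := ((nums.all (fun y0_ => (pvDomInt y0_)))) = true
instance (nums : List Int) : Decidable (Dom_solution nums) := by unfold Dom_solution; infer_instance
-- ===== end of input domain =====

-- B replaces A's hash-set membership loop by sort-based duplicate detection:
-- sort the adjacent pair sums, then scan once for two equal neighbours; objective: alternative.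

-- ===== PORT A =====
-- the 'for i in range(len(nums)-1)' loop over consecutive pairs, with the running set and early return
def solutionLoop (xs : List Int) (sums : PySem.Set Int) : Bool :=
  match xs with
  | a :: b :: rest =>
    let s := a + b
    if PySem.Set.contains sums s then true
    else solutionLoop (b :: rest) (PySem.Set.add sums s)
  | _ => false

def solution (nums : List Int) : Bool :=
  solutionLoop nums PySem.Set.empty

-- ===== PORT B =====
-- the 'for a, b in zip(sums, sums[1:])' scan over the sorted list, with early return
def adjEqScan (ys : List Int) : Bool :=
  match ys with
  | a :: b :: rest => if a == b then true else adjEqScan (b :: rest)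
  | _ => false

def solution_alt (nums : List Int) : Bool :=
  let sums := PySem.List.sorted
    ((nums.zip (PySem.List.slice nums (some 1) none)).map (fun p => p.1 + p.2))
    (fun x => x) false
  adjEqScan sums

-- ===== PRECONDITION & SPEC =====
def Spec_solution (nums : List Int) (out : Bool) : Prop := out = solution_alt nums
instance (nums : List Int) (out : Bool) : Decidable (Spec_solution nums out) := by unfold Spec_solution; infer_instance

-- ===== CLAIM (what is proved, stated in full; the proofs are below) =====
def Claim_equal_solution : Prop := ∀ (nums : List Int), Dom_solution nums → Spec_solution nums (solution nums)

-- ===== LEMMAS AND PROOFS =====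

-- the list of adjacent pair sums
def pairsOf (xs : List Int) : List Int :=
  (xs.zip xs.tail).map (fun p => p.1 + p.2)

theorem pairsOf_cons2 (a b : Int) (rest : List Int) :
    pairsOf (a :: b :: rest) = (a + b) :: pairsOf (b :: rest) := rfl

-- characterisation of A's loop: it hits True iff some pair sum is already in the set
-- or the pair sums are not pairwise distinct
theorem solutionLoop_iff : ∀ (xs : List Int) (S : PySem.Set Int),
    solutionLoop xs S = true ↔ (∃ s ∈ pairsOf xs, s ∈ S) ∨ ¬ (pairsOf xs).Nodup
  | [], _ => by simp [solutionLoop, pairsOf]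
  | [_], _ => by simp [solutionLoop, pairsOf]
  | a :: b :: rest, S => by
    have ih := solutionLoop_iff (b :: rest) (PySem.Set.add S (a + b))
    by_cases h : (a + b) ∈ S
    · simp [solutionLoop, pairsOf_cons2, h]
    · simp only [solutionLoop, pairsOf_cons2]
      rw [if_neg (by simpa [PySem.Set.contains_iff] using h)]
      rw [ih]
      simp only [List.mem_cons, List.nodup_cons, PySem.Set.mem_add]
      constructor
      · rintro (⟨s, hs, hS | rfl⟩ | hnd)
        · exact Or.inl ⟨s, Or.inr hs, hS⟩
        · exact Or.inr (fun ⟨hmem, _⟩ => hmem hs)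
        · exact Or.inr (fun ⟨_, hnd'⟩ => hnd hnd')
      · rintro (⟨s, hs | hs, hS⟩ | hnd)
        · exact absurd (hs ▸ hS) h
        · exact Or.inl ⟨s, hs, Or.inl hS⟩
        · by_cases hm : (a + b) ∈ pairsOf (b :: rest)
          · exact Or.inl ⟨a + b, hm, Or.inr rfl⟩
          · by_cases hnd' : (pairsOf (b :: rest)).Nodup
            · exact absurd ⟨hm, hnd'⟩ hnd
            · exact Or.inr hnd'

-- characterisation of B's scan: on a ≤-sorted list, it finds no equal neighbours iff the list is strictly increasing
theorem adjEqScan_false_iff : ∀ (ys : List Int), ys.Pairwise (· ≤ ·) →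
    (adjEqScan ys = false ↔ ys.Pairwise (· < ·))
  | [], _ => by simp [adjEqScan]
  | [_], _ => by simp [adjEqScan]
  | a :: b :: rest, hp => by
    have hab : a ≤ b := (List.pairwise_cons.mp hp).1 b (by simp)
    have htail : (b :: rest).Pairwise (· ≤ ·) := (List.pairwise_cons.mp hp).2
    have ih := adjEqScan_false_iff (b :: rest) htail
    simp only [adjEqScan]
    by_cases he : a = b
    · subst he
      simp only [BEq.rfl, if_true]
      constructor
      · intro h; cases h
      · intro h
        exact absurd ((List.pairwise_cons.mp h).1 a (by simp)) (lt_irrefl a)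
    · rw [if_neg (by simpa using he), ih]
      constructor
      · intro htl
        refine List.pairwise_cons.mpr ⟨?_, htl⟩
        intro c hc
        rcases List.mem_cons.mp hc with rfl | hc
        · exact lt_of_le_of_ne hab he
        · exact lt_of_le_of_lt hab ((List.pairwise_cons.mp htl).1 c hc)
      · intro h; exact (List.pairwise_cons.mp h).2

-- on a ≤-sorted list, strictly increasing = no duplicates
theorem nodup_iff_pairwise_lt (ys : List Int) (hp : ys.Pairwise (· ≤ ·)) :
    ys.Nodup ↔ ys.Pairwise (· < ·) := by
  constructor
  · intro hnd
    exact (hp.and hnd).imp (fun ⟨hle, hne⟩ => lt_of_le_of_ne hle hne)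
  · intro h
    exact h.imp ne_of_lt

-- ===== VERDICT (by name: the statement is the Claim_ definition above) =====
theorem solution_spec : Claim_equal_solution := by
  intro nums _
  unfold Spec_solution solution solution_alt
  rw [PySem.List.slice_from_one]
  show solutionLoop nums PySem.Set.empty
      = adjEqScan (PySem.List.sorted (pairsOf nums) (fun x => x) false)
  set srt := PySem.List.sorted (pairsOf nums) (fun x => x) false with hsrt
  have hperm : srt.Perm (pairsOf nums) := PySem.List.sorted_perm _ _ _
  have hple : srt.Pairwise (· ≤ ·) := by
    simpa using PySem.List.sorted_pairwise (xs := pairsOf nums) (key := fun x => x)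
  by_cases hnd : (pairsOf nums).Nodup
  · have hA : solutionLoop nums PySem.Set.empty = false := by
      rw [← Bool.not_eq_true, solutionLoop_iff]
      simp [PySem.Set.empty, hnd]
    have hB : adjEqScan srt = false := by
      rw [adjEqScan_false_iff srt hple, ← nodup_iff_pairwise_lt srt hple]
      exact hperm.nodup_iff.mpr hnd
    rw [hA, hB]
  · have hA : solutionLoop nums PySem.Set.empty = true := by
      rw [solutionLoop_iff]; exact Or.inr hnd
    have hB : adjEqScan srt = true := by
      rw [← Bool.not_eq_false, adjEqScan_false_iff srt hple, ← nodup_iff_pairwise_lt srt hple]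
      exact fun h => hnd (hperm.nodup_iff.mp h)
    rw [hA, hB]
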